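-- pv_equiv track=rewrite | github.com/Ace1928/eidosian_forge | archive_forge/src/archive_forge/func__even_pattern1.py | _even_pattern1
-- ===== SOURCE A (Python) =====
-- def _even_pattern1(n):
--     """A pattern denoted by Pj in [1] for even number of qubits:
--     [n-1, n-3, n-3, n-5, n-5, ..., 1, 1, 0, 0, 2, 2, ..., n-4, n-4, n-2]
--     """
--     pat = []
--     pat.append(n - 1)
--     for i in range((n - 2) // 2):
--         pat.append(n - 2 * i - 3)
--         pat.append(n - 2 * i - 3)
--     for i in range((n - 2) // 2):
--         pat.append(2 * i)
--         pat.append(2 * i)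
--     pat.append(n - 2)
--     return pat
-- ===== SOURCE B (Python) =====
-- def _even_pattern1(n):
--     """Closed-form indexing: the j-th output element is computed directly
--     from j (no appending loops)."""
--     k = (n - 2) // 2
--     if k < 0:
--         k = 0
--
--     def val(j):
--         if j == 0:
--             return n - 1
--         if j <= 2 * k:
--             return n - 3 - 2 * ((j - 1) // 2)
--         if j <= 4 * k:
--             return 2 * ((j - 2 * k - 1) // 2)
--         return n - 2
--
--     return [val(j) for j in range(4 * k + 2)]
-- ===== Notes on version B (the rewrite author's own statement) =====
-- stated objective: alternative
-- what changed: Replaces A's two pair-appending loops with a closed-form indexing scheme: the output length is computed first and each element is derived directly from its position by integer arithmetic (one comprehension over the index range, no appends).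
import Mathlib
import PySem

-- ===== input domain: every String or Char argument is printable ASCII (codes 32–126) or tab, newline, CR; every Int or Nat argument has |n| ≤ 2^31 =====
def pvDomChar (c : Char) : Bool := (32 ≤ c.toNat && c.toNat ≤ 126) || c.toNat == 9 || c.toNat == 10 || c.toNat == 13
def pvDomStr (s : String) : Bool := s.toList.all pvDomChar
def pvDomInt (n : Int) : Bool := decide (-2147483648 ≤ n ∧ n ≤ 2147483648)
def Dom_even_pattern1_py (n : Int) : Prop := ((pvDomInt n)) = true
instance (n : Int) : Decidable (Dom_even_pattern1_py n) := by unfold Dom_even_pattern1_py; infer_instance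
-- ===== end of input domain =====

-- B replaces A's pair-appending loops by a closed-form indexing scheme: it computes the
-- output length up front and derives each element directly from its position (alternative).

-- ===== PORT A =====
def even_pattern1_py (n : Int) : List Int :=
  let pat : List Int := []
  let pat := pat ++ [n - 1]
  let pat := (PySem.List.pyRange 0 (PySem.Int.floordiv (n - 2) 2) 1).foldl
    (fun acc i => (acc ++ [n - 2 * i - 3]) ++ [n - 2 * i - 3]) pat
  let pat := (PySem.List.pyRange 0 (PySem.Int.floordiv (n - 2) 2) 1).foldl
    (fun acc i => (acc ++ [2 * i]) ++ [2 * i]) pat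
  pat ++ [n - 2]

-- ===== PORT B =====
def even_pattern1_py_alt (n : Int) : List Int :=
  let k0 := PySem.Int.floordiv (n - 2) 2
  let k := if k0 < 0 then 0 else k0
  let val : Int → Int := fun j =>
    if j = 0 then n - 1
    else if j ≤ 2 * k then n - 3 - 2 * PySem.Int.floordiv (j - 1) 2
    else if j ≤ 4 * k then 2 * PySem.Int.floordiv (j - 2 * k - 1) 2
    else n - 2
  (PySem.List.pyRange 0 (4 * k + 2) 1).map val

-- ===== PRECONDITION & SPEC =====
def Spec_even_pattern1_py (n : Int) (out : List Int) : Prop := out = even_pattern1_py_alt n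
instance (n : Int) (out : List Int) : Decidable (Spec_even_pattern1_py n out) := by unfold Spec_even_pattern1_py; infer_instance

-- ===== CLAIM (what is proved, stated in full; the proofs are below) =====
def Claim_equal_even_pattern1_py : Prop := ∀ (n : Int), Dom_even_pattern1_py n → Spec_even_pattern1_py n (even_pattern1_py n)

-- ===== LEMMAS AND PROOFS =====

-- A's pair-appending loop: appending [f i, f i] for each i is acc ++ flatMap of doubled singletons
theorem pv_foldl_pair (l : List Int) (f : Int → Int) (acc : List Int) :
    l.foldl (fun acc i => acc ++ [f i] ++ [f i]) acc
      = acc ++ (l.map f).flatMap (fun v => [v, v]) := by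
  induction l generalizing acc with
  | nil => simp
  | cons x xs ih => simp [List.foldl_cons, List.flatMap, List.map_map, Function.comp_def]

-- doubling each element of a mapped range is mapping p ↦ a (p / 2) over a range twice as long
theorem pv_dbl (K : Nat) (a : Nat → Int) :
    ((List.range K).map a).flatMap (fun v => [v, v])
      = (List.range (2 * K)).map (fun p => a (p / 2)) := by
  induction K with
  | zero => simp
  | succ q ih =>
      have e2 : 2 * (q + 1) = (2 * q + 1) + 1 := by omega
      rw [List.range_succ, List.map_append, List.flatMap_append, ih, e2,
          List.range_succ, List.map_append, List.range_succ, List.map_append]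
      have d1 : 2 * q / 2 = q := by omega
      have d2 : (2 * q + 1) / 2 = q := by omega
      simp [d1, d2]

theorem even_pattern1_py_spec : Claim_equal_even_pattern1_py := by
  intro n _
  unfold Spec_even_pattern1_py
  simp only [even_pattern1_py, even_pattern1_py_alt]
  set m : Int := PySem.Int.floordiv (n - 2) 2 with hm
  set k : Int := if m < 0 then 0 else m with hk
  have hk0 : 0 ≤ k := by rw [hk]; split <;> omega
  obtain ⟨K, hK⟩ : ∃ K : Nat, k = (K : Int) := ⟨k.toNat, (Int.toNat_of_nonneg hk0).symm⟩
  have hfd : ∀ q : Nat, PySem.Int.floordiv ((q : Int)) 2 = ((q / 2 : Nat) : Int) := by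
    intro q; exact_mod_cast PySem.Int.floordiv_natCast q 2
  -- A's two ranges over m coincide with ranges over k (both empty when m < 0)
  have hrange : PySem.List.pyRange 0 m 1 = PySem.List.pyRange 0 k 1 := by
    rw [hk]; split
    · rw [PySem.List.pyRange_one_eq_nil (by omega), PySem.List.pyRange_one_eq_nil (by omega)]
    · rfl
  rw [hrange, pv_foldl_pair _ (fun i => n - 2 * i - 3), pv_foldl_pair _ (fun i => 2 * i)]
  -- A's descending and ascending doubled blocks in canonical form
  have hA1 : ((PySem.List.pyRange 0 k 1).map (fun i => n - 2 * i - 3)).flatMap (fun v => [v, v])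
      = (List.range (2 * K)).map (fun p => n - 3 - 2 * ((p / 2 : Nat) : Int)) := by
    rw [PySem.List.pyRange_one]
    have ht : ((k - 0).toNat) = K := by omega
    rw [ht, List.map_map, pv_dbl]
    exact List.map_congr_left fun p _ => by simp; ring
  have hA2 : ((PySem.List.pyRange 0 k 1).map (fun i => 2 * i)).flatMap (fun v => [v, v])
      = (List.range (2 * K)).map (fun p => 2 * ((p / 2 : Nat) : Int)) := by
    rw [PySem.List.pyRange_one]
    have ht : ((k - 0).toNat) = K := by omega
    rw [ht, List.map_map, pv_dbl]
    exact List.map_congr_left fun p _ => by simp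
  rw [hA1, hA2]
  -- B's index range splits into the four position blocks
  rw [PySem.List.pyRange_one_append 0 1 (4 * k + 2) (by omega) (by omega),
      PySem.List.pyRange_one_append 1 (2 * k + 1) (4 * k + 2) (by omega) (by omega),
      PySem.List.pyRange_one_append (2 * k + 1) (4 * k + 1) (4 * k + 2) (by omega) (by omega)]
  have hB1 : PySem.List.pyRange 0 1 1 = [(0 : Int)] := by decide
  have hB4 : PySem.List.pyRange (4 * k + 1) (4 * k + 2) 1 = [4 * k + 1] := by
    have e : (4 * k + 2 : Int) = (4 * k + 1) + 1 := by ring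
    rw [e, PySem.List.pyRange_one_singleton]
  have hB2 : (PySem.List.pyRange 1 (2 * k + 1) 1).map
        (fun j => if j = 0 then n - 1 else if j ≤ 2 * k then n - 3 - 2 * PySem.Int.floordiv (j - 1) 2
          else if j ≤ 4 * k then 2 * PySem.Int.floordiv (j - 2 * k - 1) 2 else n - 2)
      = (List.range (2 * K)).map (fun p => n - 3 - 2 * ((p / 2 : Nat) : Int)) := by
    rw [PySem.List.pyRange_one]
    have ht : ((2 * k + 1 - 1).toNat) = 2 * K := by omega
    rw [ht, List.map_map]
    refine List.map_congr_left fun p hp => ?_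
    rw [List.mem_range] at hp
    have h0 : ((1 : Int) + (p : Int)) ≠ 0 := by omega
    have h1 : ((1 : Int) + (p : Int)) ≤ 2 * k := by omega
    simp only [Function.comp_def, if_neg h0, if_pos h1]
    have e : ((1 : Int) + (p : Int) - 1) = ((p : Nat) : Int) := by omega
    rw [e, hfd]
  have hB3 : (PySem.List.pyRange (2 * k + 1) (4 * k + 1) 1).map
        (fun j => if j = 0 then n - 1 else if j ≤ 2 * k then n - 3 - 2 * PySem.Int.floordiv (j - 1) 2
          else if j ≤ 4 * k then 2 * PySem.Int.floordiv (j - 2 * k - 1) 2 else n - 2)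
      = (List.range (2 * K)).map (fun p => 2 * ((p / 2 : Nat) : Int)) := by
    rw [PySem.List.pyRange_one]
    have ht : ((4 * k + 1 - (2 * k + 1)).toNat) = 2 * K := by omega
    rw [ht, List.map_map]
    refine List.map_congr_left fun p hp => ?_
    rw [List.mem_range] at hp
    have h0 : (2 * k + 1 + (p : Int)) ≠ 0 := by omega
    have h1 : ¬ (2 * k + 1 + (p : Int)) ≤ 2 * k := by omega
    have h2 : (2 * k + 1 + (p : Int)) ≤ 4 * k := by omega
    simp only [Function.comp_def, if_neg h0, if_neg h1, if_pos h2]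
    have e : (2 * k + 1 + (p : Int) - 2 * k - 1) = ((p : Nat) : Int) := by omega
    rw [e, hfd]
  simp only [List.map_append, hB1, hB4, hB2, hB3]
  have hv4 : ¬ ((4 * k + 1 : Int) = 0) ∧ ¬ ((4 * k + 1 : Int) ≤ 2 * k) ∧ ¬ ((4 * k + 1 : Int) ≤ 4 * k) :=
    ⟨by omega, by omega, by omega⟩
  simp only [List.map_cons, List.map_nil, if_neg hv4.1, if_neg hv4.2.1,
    if_neg hv4.2.2, List.append_assoc, List.nil_append]
  norm_num
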